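-- pv_equiv track=rewrite | github.com/Nil29/C4PredictorAnalysis | GetOptimalFeatures.py | create_map
-- ===== SOURCE A (Python) =====
-- def create_map(split_sequences):
--     position_maps = []
--     for i in range(len(split_sequences[0])):
--         map = {}
--         value = 0
--         for sequence in split_sequences:
--             if sequence[i] not in map:
--                 map[sequence[i]] = value
--                 value += 1
--         position_maps.append(map)
--     return position_maps
-- ===== SOURCE B (Python) =====
-- def create_map(split_sequences):
--     maps = [{} for _ in split_sequences[0]]
--     for sequence in split_sequences:
--         maps = [m if sequence[i] in m else {**m, sequence[i]: len(m)}
--                 for i, m in enumerate(maps)]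
--     return maps
-- ===== Notes on version B (the rewrite author's own statement) =====
-- stated objective: alternative
-- what changed: Transposes the traversal: instead of A's outer loop over positions with an inner scan per column, B makes a single row-wise pass over the sequences, rebuilding the whole list of per-position maps (with len(m) as the next index) at each row.
import Mathlib
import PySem

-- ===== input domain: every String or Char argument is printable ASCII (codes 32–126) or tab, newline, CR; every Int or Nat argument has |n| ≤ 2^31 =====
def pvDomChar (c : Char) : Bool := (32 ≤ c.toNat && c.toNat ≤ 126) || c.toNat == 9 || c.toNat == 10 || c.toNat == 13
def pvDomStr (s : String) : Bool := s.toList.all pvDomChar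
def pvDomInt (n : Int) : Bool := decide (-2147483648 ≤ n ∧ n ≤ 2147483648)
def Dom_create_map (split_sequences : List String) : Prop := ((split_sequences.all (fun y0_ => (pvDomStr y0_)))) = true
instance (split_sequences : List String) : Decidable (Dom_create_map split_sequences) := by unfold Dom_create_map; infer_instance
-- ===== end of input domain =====

-- B replaces A's column-by-column scan (outer loop over positions, inner over sequences)
-- by a single row-wise pass over the sequences that rebuilds all per-position maps at once
-- (objective: alternative traversal order, same cost).


-- ===== PORT A =====
-- sequence[i] as a one-character string; exact wherever Python does not raise
-- IndexError (Pre_ guarantees the index is in range; the ' ' default is never read there).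
def pvCharAt (sequence : String) (i : Int) : String :=
  String.ofList [((PySem.Str.pyGet? sequence i).getD ' ')]

def create_map (split_sequences : List String) : List (List (String × Int)) :=
  (PySem.List.pyRange 0 (PySem.Str.len (split_sequences.headD "")) 1).foldl
    (fun position_maps i =>
      let st := split_sequences.foldl
        (fun (st : PySem.Dict String Int × Int) sequence =>
          if st.1.contains (pvCharAt sequence i) = false then
            (st.1.insert (pvCharAt sequence i) st.2, st.2 + 1)
          else st)
        (PySem.Dict.mk [], 0)
      position_maps ++ [st.1.items])
    []

-- ===== PORT B =====
def create_map_alt (split_sequences : List String) : List (List (String × Int)) :=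
  let maps0 : List (PySem.Dict String Int) :=
    (split_sequences.headD "").toList.map (fun _ => PySem.Dict.mk [])
  let final := split_sequences.foldl
    (fun maps sequence =>
      (PySem.List.enumerate maps).map (fun p =>
        if p.2.contains (pvCharAt sequence p.1) then p.2
        else p.2.insert (pvCharAt sequence p.1) ((p.2.items.length : Int))))
    maps0
  final.map (fun m => m.items)

-- ===== PRECONDITION & SPEC =====
-- Pre_ excludes exactly the inputs where Python A raises IndexError: the empty list
-- (split_sequences[0]) and lists where some sequence is shorter than the first one
-- (sequence[i] out of range).
def Pre_create_map (split_sequences : List String) : Prop :=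
  split_sequences ≠ [] ∧
    ∀ s ∈ split_sequences, (split_sequences.headD "").toList.length ≤ s.toList.length
instance (split_sequences : List String) : Decidable (Pre_create_map split_sequences) := by
  unfold Pre_create_map; infer_instance
def pvWitness_create_map : List String := ["ab", "acd", "bb"]
def Spec_create_map (split_sequences : List String) (out : List (List (String × Int))) : Prop := out = create_map_alt split_sequences
instance (split_sequences : List String) (out : List (List (String × Int))) : Decidable (Spec_create_map split_sequences out) := by unfold Spec_create_map; infer_instance

-- ===== CLAIM (what is proved, stated in full; the proofs are below) =====
def Claim_equal_create_map : Prop := ∀ (split_sequences : List String), Dom_create_map split_sequences → Pre_create_map split_sequences → Spec_create_map split_sequences (create_map split_sequences)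

-- ===== LEMMAS AND PROOFS =====

-- per-column step shared by both characterisations
def pvStep1 (i : Int) (sequence : String) (m : PySem.Dict String Int) : PySem.Dict String Int :=
  if m.contains (pvCharAt sequence i) then m
  else m.insert (pvCharAt sequence i) ((m.items.length : Int))

-- A's inner (dict, counter) fold, started with counter = size, keeps counter = size
lemma pv_colA (i : Int) (xs : List String) (d : PySem.Dict String Int) :
    xs.foldl
        (fun (st : PySem.Dict String Int × Int) sequence =>
          if st.1.contains (pvCharAt sequence i) = false then
            (st.1.insert (pvCharAt sequence i) st.2, st.2 + 1)
          else st)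
        (d, (d.items.length : Int))
      = (xs.foldl (fun m sequence => pvStep1 i sequence m) d,
         ((xs.foldl (fun m sequence => pvStep1 i sequence m) d).items.length : Int)) := by
  induction xs generalizing d with
  | nil => simp
  | cons x t ih =>
      simp only [List.foldl_cons]
      cases h : d.contains (pvCharAt x i) with
      | true =>
          rw [if_neg (by simp), pvStep1, if_pos h]
          exact ih d
      | false =>
          rw [if_pos (by simp [h]), pvStep1, if_neg (by simp [h])]
          have hlen : ((d.insert (pvCharAt x i) ((d.items.length : Int))).items.length : Int)
              = (d.items.length : Int) + 1 := by
            simp [PySem.Dict.insert, h]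
          rw [← hlen]
          exact ih _
  
-- enumerate of a mapped list enumerates the original
lemma pv_enumerate_map {α β : Type} (g : α → β) (l : List α) (s : Int) :
    PySem.List.enumerate (l.map g) s
      = (PySem.List.enumerate l s).map (fun p => (p.1, g p.2)) := by
  induction l generalizing s with
  | nil => simp [PySem.List.enumerate_nil]
  | cons x t ih => simp [PySem.List.enumerate_cons, ih]

-- enumerating an enumeration pairs each element with its own index
lemma pv_enumerate_enumerate {α : Type} (l : List α) (s : Int) :
    PySem.List.enumerate (PySem.List.enumerate l s) s
      = (PySem.List.enumerate l s).map (fun p => (p.1, p)) := by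
  induction l generalizing s with
  | nil => simp [PySem.List.enumerate_nil]
  | cons x t ih => simp [PySem.List.enumerate_cons, ih]

-- the row-wise fold keeps the state in the shape "index-determined list" and
-- computes, at each index, the column-wise fold for that index
lemma pv_rowfold (c : List Char) (xs : List String) (G : Int → PySem.Dict String Int) :
    xs.foldl
        (fun maps sequence =>
          (PySem.List.enumerate maps).map (fun p =>
            if p.2.contains (pvCharAt sequence p.1) then p.2
            else p.2.insert (pvCharAt sequence p.1) ((p.2.items.length : Int))))
        ((PySem.List.enumerate c 0).map (fun p => G p.1))
      = (PySem.List.enumerate c 0).map (fun p =>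
          xs.foldl (fun m sequence => pvStep1 p.1 sequence m) (G p.1)) := by
  induction xs generalizing G with
  | nil => simp
  | cons x t ih =>
      simp only [List.foldl_cons]
      have h1 : PySem.List.enumerate ((PySem.List.enumerate c 0).map (fun p => G p.1)) 0
          = (PySem.List.enumerate c 0).map (fun p => (p.1, G p.1)) := by
        rw [pv_enumerate_map, pv_enumerate_enumerate, List.map_map]
        rfl
      rw [h1, List.map_map]
      have h2 : ((PySem.List.enumerate c 0).map
            ((fun (p : Int × PySem.Dict String Int) =>
                if p.2.contains (pvCharAt x p.1) then p.2
                else p.2.insert (pvCharAt x p.1) ((p.2.items.length : Int)))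
              ∘ (fun p => (p.1, G p.1))))
          = (PySem.List.enumerate c 0).map (fun p => pvStep1 p.1 x (G p.1)) := by
        refine List.map_congr_left (fun p _ => ?_)
        simp [pvStep1]
      rw [h2]
      exact ih (fun i => pvStep1 i x (G i))

theorem create_map_spec : Claim_equal_create_map := by
  intro xs _ _
  unfold Spec_create_map create_map create_map_alt
  rw [PySem.List.foldl_append_singleton_eq_map, List.nil_append]
  have hmaps0 : ((xs.headD "").toList.map (fun _ => PySem.Dict.mk ([] : List (String × Int))))
      = (PySem.List.enumerate (xs.headD "").toList 0).map
          (fun p => (fun (_ : Int) => PySem.Dict.mk ([] : List (String × Int))) p.1) := by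
    conv_lhs => rw [← PySem.List.map_snd_enumerate (xs.headD "").toList 0]
    rw [List.map_map]
    rfl
  simp only [hmaps0]
  rw [pv_rowfold (xs.headD "").toList xs (fun _ => PySem.Dict.mk ([] : List (String × Int)))]
  rw [List.map_map]
  have hfst : (PySem.List.pyRange 0 (PySem.Str.len (xs.headD "")) 1)
      = (PySem.List.enumerate (xs.headD "").toList 0).map (fun p => p.1) := by
    rw [PySem.List.map_fst_enumerate]
    simp [PySem.Str.len_eq]
  rw [hfst, List.map_map]
  refine List.map_congr_left (fun p _ => ?_)
  show ((xs.foldl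
        (fun (st : PySem.Dict String Int × Int) sequence =>
          if st.1.contains (pvCharAt sequence p.1) = false then
            (st.1.insert (pvCharAt sequence p.1) st.2, st.2 + 1)
          else st)
        (PySem.Dict.mk [], 0)).1).items
      = (xs.foldl (fun m sequence => pvStep1 p.1 sequence m)
          (PySem.Dict.mk ([] : List (String × Int)))).items
  have h := pv_colA p.1 xs (PySem.Dict.mk [])
  simp only [List.length_nil, Nat.cast_zero] at h
  rw [h]
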